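-- pv_equiv track=rewrite | github.com/michael-lazar/astrobotany | astrobotany/featuretest/gardenoverviewart.py | garden_paintPart
-- ===== SOURCE A (Python) =====
-- def colorize(text: str, fg = None, bg = None) -> str:
--     """
--     Colorize a line of text using the ansi-240 color palette.
--     """
--     if fg is not None:
--         text = f"\033[38;5;{fg+15}m" + text
--     if bg is not None:
--         text = f"\033[48;5;{bg+15}m" + text
--     if fg is not None or bg is not None:
--         text = text + "\033[0m"
--     return text
--
-- def garden_paintPart (target, part, color=None):
--     # paint a complete frame "over" existing image
--     # these frames all have the same size
--     part = part.strip()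
--     x = 0
--     y = 0
--     for i in range(len(part)):
--         if part[i] == '\n':
--             x = 0
--             y += 1
--         else:
--             if part[i] != ' ':
--                 if part[i].isdigit():
--                     # replace digits with empty strings showing the
--                     # browsers background
--                     # effectively deleting the border around the image
--                     target[y][x] = ' '
--                 elif color != None and color > 0:
--                     target[y][x] = colorize(part[i], color)
--                 else:
--                     target[y][x] = part[i]
--             x += 1
--     return target
-- ===== SOURCE B (Python) =====
-- def colorize(text: str, fg = None, bg = None) -> str:
--     """
--     Colorize a line of text using the ansi-240 color palette.
--     """
--     if fg is not None:
--         text = f"\033[38;5;{fg+15}m" + text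
--     if bg is not None:
--         text = f"\033[48;5;{bg+15}m" + text
--     if fg is not None or bg is not None:
--         text = text + "\033[0m"
--     return text
--
--
-- def render_cell(ch, color):
--     # what one non-space frame glyph becomes on the grid
--     if ch.isdigit():
--         return ' '
--     if color is not None and color > 0:
--         return colorize(ch, color)
--     return ch
--
--
-- def garden_paintPart(target, part, color=None):
--     # stage 1: compute the painting plan as pure data — every (row, col) -> glyph
--     # write the frame asks for, with no grid in sight
--     plan = [((y, x), render_cell(ch, color))
--             for y, line in enumerate(part.strip().split('\n'))
--             for x, ch in enumerate(line)
--             if ch != ' ']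
--     # stage 2: apply the plan to the grid
--     for (y, x), v in plan:
--         target[y][x] = v
--     return target
-- ===== Notes on version B (the rewrite author's own statement) =====
-- stated objective: alternative
-- what changed: B is a two-stage plan/apply decomposition: it first builds the full list of ((row,col), glyph) writes as pure data from the split lines (no grid touched), then a second pass applies the plan to the grid, replacing A's single character scan with manual x/y counters and a newline-reset branch.
import Mathlib
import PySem

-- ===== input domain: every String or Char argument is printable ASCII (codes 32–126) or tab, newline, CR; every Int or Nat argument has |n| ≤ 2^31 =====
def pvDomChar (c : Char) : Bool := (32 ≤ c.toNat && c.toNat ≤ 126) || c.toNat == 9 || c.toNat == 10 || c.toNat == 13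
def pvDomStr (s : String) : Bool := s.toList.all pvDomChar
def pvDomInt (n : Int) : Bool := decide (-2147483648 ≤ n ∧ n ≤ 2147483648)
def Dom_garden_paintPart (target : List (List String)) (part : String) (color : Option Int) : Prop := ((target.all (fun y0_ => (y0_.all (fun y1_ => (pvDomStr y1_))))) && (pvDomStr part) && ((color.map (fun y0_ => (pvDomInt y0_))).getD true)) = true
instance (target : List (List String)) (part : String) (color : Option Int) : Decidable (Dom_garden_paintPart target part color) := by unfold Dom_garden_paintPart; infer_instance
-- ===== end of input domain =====

-- B first computes the whole set of writes as pure data (a plan of (row,col) -> glyph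
-- entries built from the split lines) and then applies the plan to the grid in a second
-- stage, instead of A's single character scan with manual x/y counters (objective: simpler).
-- Both Pythons mutate `target` in place identically; the theorems are about the return value.


-- ===== PORT A =====
-- the module helper `colorize` (called with fg = color, bg = None by both Pythons);
-- strings are built through List Char (String.ofList/toList), exact for f-string concatenation
def colorize (text : String) (fg : Option Int) (bg : Option Int) : String :=
  let t1 := match fg with
    | some f => String.ofList ("\x1b[38;5;".toList ++ PySem.Int.toChars (f + 15) ++ ['m'] ++ text.toList)
    | none => text
  let t2 := match bg with
    | some b => String.ofList ("\x1b[48;5;".toList ++ PySem.Int.toChars (b + 15) ++ ['m'] ++ t1.toList)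
    | none => t1
  if fg.isSome || bg.isSome then String.ofList (t2.toList ++ "\x1b[0m".toList) else t2

-- the body of A's `for i in range(len(part))` loop over state (x, y, target);
-- target[y][x] = v is List.set (Pre_ keeps every write in range, where Python does not raise)
def paintStepA (color : Option Int) (st : Nat × Nat × List (List String)) (c : Char) :
    Nat × Nat × List (List String) :=
  if c = '\n' then
    (0, st.2.1 + 1, st.2.2)
  else
    let tgt :=
      if c ≠ ' ' then
        if PySem.Chars.isdigit c then
          st.2.2.set st.2.1 ((st.2.2.getD st.2.1 []).set st.1 " ")
        else if (match color with | some cl => decide (0 < cl) | none => false) then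
          st.2.2.set st.2.1 ((st.2.2.getD st.2.1 []).set st.1 (colorize (String.ofList [c]) color none))
        else
          st.2.2.set st.2.1 ((st.2.2.getD st.2.1 []).set st.1 (String.ofList [c]))
      else st.2.2
    (st.1 + 1, st.2.1, tgt)

def garden_paintPart (target : List (List String)) (part : String) (color : Option Int) :
    List (List String) :=
  (((PySem.Str.strip part).toList).foldl (paintStepA color) (0, 0, target)).2.2

-- ===== PORT B =====
-- Source B's render_cell: what one non-space frame glyph becomes on the grid
def renderCell (c : Char) (color : Option Int) : String :=
  if PySem.Chars.isdigit c then " "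
  else if (match color with | some cl => decide (0 < cl) | none => false) then
    colorize (String.ofList [c]) color none
  else String.ofList [c]

-- Source B's stage 2 loop body: `target[y][x] = v` for one plan entry ((y, x), v)
def applyWrite (g : List (List String)) (w : (Int × Int) × String) : List (List String) :=
  g.set w.1.1.toNat ((g.getD w.1.1.toNat []).set w.1.2.toNat w.2)

-- stage 1 (the comprehension -> flatMap / filter / map over the two enumerates),
-- then stage 2 (fold the plan over the grid); split('\n') is List.splitOn
def garden_paintPart_alt (target : List (List String)) (part : String) (color : Option Int) :
    List (List String) :=
  let plan :=
    (PySem.List.enumerate (((PySem.Str.strip part).toList).splitOn '\n') 0).flatMap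
      (fun yl =>
        ((PySem.List.enumerate yl.2 0).filter (fun xc => xc.2 != ' ')).map
          (fun xc => ((yl.1, xc.1), renderCell xc.2 color)))
  plan.foldl applyWrite target

-- ===== PRECONDITION & SPEC =====
-- Pre_ excludes exactly the inputs where some painted (non-space) glyph of the stripped
-- frame falls outside the target grid: there Python A raises IndexError (target[y][x] = …).
def Pre_garden_paintPart (target : List (List String)) (part : String) (color : Option Int) : Prop :=
  ((((PySem.Str.strip part).toList).splitOn '\n').zipIdx.all (fun ly =>
    ly.1.zipIdx.all (fun cx =>
      cx.1 == ' ' ||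
        (decide (ly.2 < target.length) && decide (cx.2 < (target.getD ly.2 []).length))))) = true
instance (target : List (List String)) (part : String) (color : Option Int) :
    Decidable (Pre_garden_paintPart target part color) := by
  unfold Pre_garden_paintPart; infer_instance

def pvWitness_garden_paintPart : List (List String) × String × Option Int :=
  ([[" ", " "], [" ", " "]], "ab\nc1", some 2)

def Spec_garden_paintPart (target : List (List String)) (part : String) (color : Option Int)
    (out : List (List String)) : Prop := out = garden_paintPart_alt target part color
instance (target : List (List String)) (part : String) (color : Option Int)
    (out : List (List String)) : Decidable (Spec_garden_paintPart target part color out) := by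
  unfold Spec_garden_paintPart; infer_instance

-- ===== CLAIM (what is proved, stated in full; the proofs are below) =====
def Claim_equal_garden_paintPart : Prop := ∀ (target : List (List String)) (part : String) (color : Option Int), Dom_garden_paintPart target part color → Pre_garden_paintPart target part color → Spec_garden_paintPart target part color (garden_paintPart target part color)

-- ===== LEMMAS AND PROOFS =====

-- proof-only bridge: the effect of one painted cell (x, c) on row y of the grid
def paintCellB (color : Option Int) (y : Nat) (g : List (List String)) (xc : Int × Char) :
    List (List String) :=
  if xc.2 = ' ' then g
  else g.set y ((g.getD y []).set xc.1.toNat (renderCell xc.2 color))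

-- one step of A on a non-newline character is one cell
theorem paintStepA_eq_cell (color : Option Int) (x y : Nat) (g : List (List String)) (c : Char)
    (hc : c ≠ '\n') :
    paintStepA color (x, y, g) c = (x + 1, y, paintCellB color y g ((x : Int), c)) := by
  simp only [paintStepA, paintCellB, renderCell, if_neg hc, Int.toNat_natCast]
  by_cases hsp : c = ' '
  · simp [hsp]
  · simp only [hsp, if_neg, ne_eq, not_false_iff, if_true]
    split_ifs <;> rfl

-- A's scan across one newline-free line, started at column x, is a fold of cells
theorem paintLine_eq (color : Option Int) (l : List Char) (h : '\n' ∉ l) :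
    ∀ (x y : Nat) (g : List (List String)),
      l.foldl (paintStepA color) (x, y, g)
        = (x + l.length, y, (PySem.List.enumerate l (x : Int)).foldl (paintCellB color y) g) := by
  induction l with
  | nil => intro x y g; simp [PySem.List.enumerate_nil]
  | cons c l ih =>
    intro x y g
    have hc : c ≠ '\n' := fun hh => h (hh ▸ List.mem_cons_self ..)
    have hl : '\n' ∉ l := fun hh => h (List.mem_cons_of_mem _ hh)
    rw [List.foldl_cons, paintStepA_eq_cell color x y g c hc, ih hl,
      PySem.List.enumerate_cons, List.foldl_cons]
    have : (x : Int) + 1 = ((x + 1 : Nat) : Int) := by push_cast; ring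
    rw [this]
    have hx : x + 1 + l.length = x + (c :: l).length := by simp [List.length_cons]; omega
    rw [hx]

-- no piece produced by splitOnP satisfies the splitting predicate
theorem not_mem_splitOnP {α : Type} (p : α → Bool) (cs : List α) :
    ∀ l ∈ cs.splitOnP p, ∀ a ∈ l, ¬ p a = true := by
  induction cs with
  | nil => simp
  | cons c cs ih =>
    rw [List.splitOnP_cons]
    by_cases h : p c
    · simp only [if_pos h]
      intro l hl
      rcases List.mem_cons.mp hl with rfl | hl
      · simp
      · exact ih l hl
    · rw [if_neg h]
      obtain ⟨hd, tl, he⟩ := List.exists_cons_of_ne_nil (List.splitOnP_ne_nil p cs)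
      rw [he, List.modifyHead_cons]
      intro l hl a ha
      rcases List.mem_cons.mp hl with rfl | hl
      · rcases List.mem_cons.mp ha with rfl | ha
        · simpa using h
        · exact ih hd (he ▸ List.mem_cons_self ..) a ha
      · exact ih l (he ▸ List.mem_cons_of_mem _ hl) a ha

theorem not_mem_splitOn (cs : List Char) : ∀ l ∈ cs.splitOn '\n', '\n' ∉ l := by
  intro l hl hm
  exact not_mem_splitOnP (· == '\n') cs l hl '\n' hm (by simp)

-- A's scan of the whole frame (lines interleaved with '\n'), started at row y,
-- is the nested fold of cells over the enumerated lines
theorem paintLines_eq (color : Option Int) :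
    ∀ (L : List (List Char)), (∀ l ∈ L, '\n' ∉ l) → ∀ (y : Nat) (g : List (List String)),
      ((List.intercalate ['\n'] L).foldl (paintStepA color) (0, y, g)).2.2
        = (PySem.List.enumerate L (y : Int)).foldl
            (fun g yl => (PySem.List.enumerate yl.2 0).foldl (paintCellB color yl.1.toNat) g) g := by
  intro L
  induction L with
  | nil => intro _ y g; simp [List.intercalate, PySem.List.enumerate_nil]
  | cons l L ih =>
    intro h y g
    have hl : '\n' ∉ l := h l (List.mem_cons_self ..)
    cases L with
    | nil =>
      have hint : List.intercalate ['\n'] [l] = l := by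
        simp [List.intercalate, List.intersperse]
      rw [hint, paintLine_eq color l hl 0 y g]
      simp [PySem.List.enumerate_cons, PySem.List.enumerate_nil]
    | cons l2 L2 =>
      have hint : List.intercalate ['\n'] (l :: l2 :: L2)
          = l ++ '\n' :: List.intercalate ['\n'] (l2 :: L2) := by
        simp [List.intercalate, List.intersperse_cons₂]
      rw [hint, List.foldl_append, paintLine_eq color l hl 0 y g, List.foldl_cons]
      have hstep : paintStepA color (0 + l.length, y, (PySem.List.enumerate l ((0:Nat) : Int)).foldl (paintCellB color y) g) '\n'
          = (0, y + 1, (PySem.List.enumerate l ((0:Nat) : Int)).foldl (paintCellB color y) g) := by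
        simp [paintStepA]
      rw [hstep, ih (fun l' hl' => h l' (List.mem_cons_of_mem _ hl')) (y + 1)]
      conv_rhs => rw [PySem.List.enumerate_cons, List.foldl_cons]
      have hy : (y : Int) + 1 = ((y + 1 : Nat) : Int) := by push_cast; ring
      rw [hy]
      simp only [Int.toNat_natCast, Nat.cast_zero]

-- B's per-line plan (filter the spaces, map to writes), applied to the grid,
-- is the fold of cells over the enumerated line
theorem planLine_eq (color : Option Int) (yi : Int) (l : List Char) :
    ∀ (x0 : Int) (g : List (List String)),
      ((((PySem.List.enumerate l x0).filter (fun xc => xc.2 != ' ')).map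
          (fun xc => ((yi, xc.1), renderCell xc.2 color))).foldl applyWrite g)
        = (PySem.List.enumerate l x0).foldl (paintCellB color yi.toNat) g := by
  induction l with
  | nil => intro x0 g; simp [PySem.List.enumerate_nil]
  | cons c l ih =>
    intro x0 g
    rw [PySem.List.enumerate_cons]
    by_cases hsp : c = ' '
    · rw [List.filter_cons]
      simp only [hsp, bne_self_eq_false, if_neg Bool.false_ne_true, List.foldl_cons]
      rw [ih]
      have : paintCellB color yi.toNat g (x0, ' ') = g := by simp [paintCellB]
      rw [this]
    · rw [List.filter_cons]
      have hb : ((x0, c).2 != ' ') = true := by simpa using hsp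
      simp only [hb, if_pos, List.map_cons, List.foldl_cons]
      rw [ih]
      have : applyWrite g ((yi, x0), renderCell c color) = paintCellB color yi.toNat g (x0, c) := by
        simp [applyWrite, paintCellB, hsp]
      rw [this]

-- the two ports agree on every input
set_option maxHeartbeats 1000000 in
theorem garden_paintPart_eq_alt (target : List (List String)) (part : String)
    (color : Option Int) :
    garden_paintPart target part color = garden_paintPart_alt target part color := by
  unfold garden_paintPart garden_paintPart_alt
  have hrec : List.intercalate ['\n'] (((PySem.Str.strip part).toList).splitOn '\n')
      = (PySem.Str.strip part).toList :=
    List.intercalate_splitOn (xs := (PySem.Str.strip part).toList) '\n'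
  conv_lhs => rw [← hrec]
  rw [paintLines_eq color _ (not_mem_splitOn _) 0 target, List.foldl_flatMap]
  simp only [planLine_eq, Nat.cast_zero]

-- ===== VERDICT (by name: the statement is the Claim_ definition above) =====
theorem garden_paintPart_spec : Claim_equal_garden_paintPart := by
  unfold Claim_equal_garden_paintPart Spec_garden_paintPart
  intro target part color _dom _pre
  exact garden_paintPart_eq_alt target part color
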